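-- pv_equiv track=rewrite | github.com/hervebronnimann/adventofcode | 2024/22/22.2.py | payoff
-- ===== SOURCE A (Python) =====
-- from collections import defaultdict
--
-- def mix(x,y): return x ^ y
--
-- def prune(x): return x % 16777216
--
-- def secret(x):
--     x = prune(mix(x * 64, x))
--     x = prune(mix(x // 32, x))
--     x = prune(mix(x * 2048, x))
--     return x
--
-- def payoff(x,n):
--     c1,c2,c3,c4 = 0,0,0,0
--     result = defaultdict(int)
--     for i in range(n):
--         z = secret(x)
--         c1,c2,c3,c4 = c2,c3,c4,z%10-x%10
--         if i >= 3 and (c1,c2,c3,c4) not in result: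
--             result[(c1,c2,c3,c4)] = z%10
--         x = z
--     return result
-- ===== SOURCE B (Python) =====
-- from collections import defaultdict
--
-- def mix(x, y): return x ^ y
--
-- def prune(x): return x % 16777216
--
-- def secret(x):
--     x = prune(mix(x * 64, x))
--     x = prune(mix(x // 32, x))
--     x = prune(mix(x * 2048, x))
--     return x
--
-- def payoff(x, n):
--     # Build the whole price series first, then slide a 4-window of changes.
--     prices = [x % 10]
--     s = x
--     for _ in range(n):
--         s = secret(s)
--         prices.append(s % 10)
--     changes = [b - a for a, b in zip(prices, prices[1:])]
--     result = defaultdict(int)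
--     for key, price in zip(zip(changes, changes[1:], changes[2:], changes[3:]), prices[4:]):
--         if key not in result:
--             result[key] = price
--     return result
-- ===== Notes on version B (the rewrite author's own statement) =====
-- stated objective: alternative
-- what changed: A keeps four rolling change registers and the running secret inside one loop; B first materialises the whole prices list, derives the changes list by a pairwise zip, and then slides a 4-window via zips of shifted change lists paired with the aligned end price, feeding the same first-occurrence dict fill.
import Mathlib
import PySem

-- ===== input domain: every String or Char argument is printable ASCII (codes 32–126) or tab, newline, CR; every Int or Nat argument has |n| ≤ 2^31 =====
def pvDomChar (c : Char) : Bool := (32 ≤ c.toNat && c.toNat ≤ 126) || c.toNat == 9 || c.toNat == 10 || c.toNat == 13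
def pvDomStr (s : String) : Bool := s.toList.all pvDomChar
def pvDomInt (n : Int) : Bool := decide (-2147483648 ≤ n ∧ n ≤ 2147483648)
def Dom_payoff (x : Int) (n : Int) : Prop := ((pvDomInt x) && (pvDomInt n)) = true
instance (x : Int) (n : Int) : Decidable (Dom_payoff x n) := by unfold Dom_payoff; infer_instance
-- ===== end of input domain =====

-- B builds the full price/change lists first and slides a 4-window over them,
-- instead of A's rolling registers inside one loop (objective: alternative decomposition; same cost).

-- ===== PORT A =====
def pvMixA (x y : Int) : Int := PySem.Int.bxor x y
def pvPruneA (x : Int) : Int := PySem.Int.mod x 16777216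
def pvSecretA (x : Int) : Int :=
  let x1 := pvPruneA (pvMixA (x * 64) x)
  let x2 := pvPruneA (pvMixA (PySem.Int.floordiv x1 32) x1)
  pvPruneA (pvMixA (x2 * 2048) x2)

def payoff (x : Int) (n : Int) : List (Int × Int × Int × Int × Int) :=
  let st := (PySem.List.pyRange 0 n 1).foldl
    (fun (st : Int × Int × Int × Int × PySem.Dict (Int × Int × Int × Int) Int × Int) (i : Int) =>
      let z := pvSecretA st.2.2.2.2.2
      let c1 := st.2.1
      let c2 := st.2.2.1
      let c3 := st.2.2.2.1
      let c4 := PySem.Int.mod z 10 - PySem.Int.mod st.2.2.2.2.2 10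
      let result := st.2.2.2.2.1
      let result :=
        if 3 ≤ i ∧ result.contains (c1, c2, c3, c4) = false then
          result.insert (c1, c2, c3, c4) (PySem.Int.mod z 10)
        else result
      (c1, c2, c3, c4, result, z))
    (0, 0, 0, 0, PySem.Dict.empty, x)
  st.2.2.2.2.1.items.map (fun kv => (kv.1.1, kv.1.2.1, kv.1.2.2.1, kv.1.2.2.2, kv.2))

-- ===== PORT B =====
def pvMixB (x y : Int) : Int := PySem.Int.bxor x y
def pvPruneB (x : Int) : Int := PySem.Int.mod x 16777216
def pvSecretB (x : Int) : Int :=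
  let x1 := pvPruneB (pvMixB (x * 64) x)
  let x2 := pvPruneB (pvMixB (PySem.Int.floordiv x1 32) x1)
  pvPruneB (pvMixB (x2 * 2048) x2)

-- prices[1:], changes[k:], prices[4:] are ports of nonnegative-start slices: List.drop is exact there.
def payoff_alt (x : Int) (n : Int) : List (Int × Int × Int × Int × Int) :=
  let sp := (PySem.List.pyRange 0 n 1).foldl
    (fun (st : Int × List Int) (_ : Int) =>
      let s := pvSecretB st.1
      (s, st.2 ++ [PySem.Int.mod s 10]))
    (x, [PySem.Int.mod x 10])
  let prices := sp.2
  let changes := (List.zip prices (prices.drop 1)).map (fun ab => ab.2 - ab.1)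
  let pairs := List.zip
    (List.zip changes (List.zip (changes.drop 1) (List.zip (changes.drop 2) (changes.drop 3))))
    (prices.drop 4)
  let result := pairs.foldl
    (fun (r : PySem.Dict (Int × Int × Int × Int) Int) kp =>
      if r.contains kp.1 = false then r.insert kp.1 kp.2 else r)
    PySem.Dict.empty
  result.items.map (fun kv => (kv.1.1, kv.1.2.1, kv.1.2.2.1, kv.1.2.2.2, kv.2))

-- ===== PRECONDITION & SPEC =====
def Spec_payoff (x : Int) (n : Int) (out : List (Int × Int × Int × Int × Int)) : Prop := out = payoff_alt x n
instance (x : Int) (n : Int) (out : List (Int × Int × Int × Int × Int)) : Decidable (Spec_payoff x n out) := by unfold Spec_payoff; infer_instance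

-- ===== CLAIM (what is proved, stated in full; the proofs are below) =====
def Claim_equal_payoff : Prop := ∀ (x : Int) (n : Int), Dom_payoff x n → Spec_payoff x n (payoff x n)

-- ===== LEMMAS AND PROOFS =====

-- the iterated secret, its price digit, and the change sequence
def pvIter (x : Int) : Nat → Int
  | 0 => x
  | k + 1 => pvSecretA (pvIter x k)

def pvP (x : Int) (k : Nat) : Int := PySem.Int.mod (pvIter x k) 10

def pvD (x : Int) (k : Nat) : Int := pvP x (k + 1) - pvP x k

-- register value of c_{5-j} after k iterations (0 outside history)
def pvC (x : Int) (k j : Nat) : Int := if j ≤ k then pvD x (k - j) else 0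

-- the common (window, price) stream both programs feed to the first-occurrence fold
def pvStream (x : Int) : Nat → List ((Int × Int × Int × Int) × Int)
  | 0 => []
  | k + 1 => pvStream x k ++
      (if 3 ≤ k then [((pvD x (k - 3), pvD x (k - 2), pvD x (k - 1), pvD x k), pvP x (k + 1))] else [])

def pvIns (r : PySem.Dict (Int × Int × Int × Int) Int) (kp : (Int × Int × Int × Int) × Int) :
    PySem.Dict (Int × Int × Int × Int) Int :=
  if r.contains kp.1 = false then r.insert kp.1 kp.2 else r

theorem pvA_loop (x : Int) (k : Nat) :
    (PySem.List.pyRange 0 (k : Int) 1).foldl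
      (fun (st : Int × Int × Int × Int × PySem.Dict (Int × Int × Int × Int) Int × Int) (i : Int) =>
        let z := pvSecretA st.2.2.2.2.2
        let c1 := st.2.1
        let c2 := st.2.2.1
        let c3 := st.2.2.2.1
        let c4 := PySem.Int.mod z 10 - PySem.Int.mod st.2.2.2.2.2 10
        let result := st.2.2.2.2.1
        let result :=
          if 3 ≤ i ∧ result.contains (c1, c2, c3, c4) = false then
            result.insert (c1, c2, c3, c4) (PySem.Int.mod z 10)
          else result
        (c1, c2, c3, c4, result, z))
      (0, 0, 0, 0, PySem.Dict.empty, x)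
    = (pvC x k 4, pvC x k 3, pvC x k 2, pvC x k 1,
       (pvStream x k).foldl pvIns PySem.Dict.empty, pvIter x k) := by
  induction k with
  | zero => simp [pvC, pvIter, pvStream]
  | succ k ih =>
      rw [show ((k + 1 : Nat) : Int) = (k : Int) + 1 by push_cast; ring,
        PySem.List.pyRange_one_succ_right (by positivity), List.foldl_append, ih]
      simp only [List.foldl_cons, List.foldl_nil, pvStream, List.foldl_append]
      have f1 : pvC x (k + 1) 1 = pvD x k := by unfold pvC; rw [if_pos (by omega)]; simp
      by_cases h3 : 3 ≤ k
      · have hg : (3 : Int) ≤ (k : Int) := by exact_mod_cast h3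
        have e1 : pvC x k 1 = pvD x (k - 1) := by unfold pvC; rw [if_pos (by omega)]
        have e2 : pvC x k 2 = pvD x (k - 2) := by unfold pvC; rw [if_pos (by omega)]
        have e3 : pvC x k 3 = pvD x (k - 3) := by unfold pvC; rw [if_pos (by omega)]
        have f2 : pvC x (k + 1) 2 = pvD x (k - 1) := by
          unfold pvC; rw [if_pos (by omega)]; congr 1
        have f3 : pvC x (k + 1) 3 = pvD x (k - 2) := by
          unfold pvC; rw [if_pos (by omega)]; congr 1
        have f4 : pvC x (k + 1) 4 = pvD x (k - 3) := by
          unfold pvC; rw [if_pos (by omega)]; congr 1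
        simp only [if_pos h3, List.foldl_cons, List.foldl_nil]
        simp [e1, e2, e3, f1, f2, f3, f4, pvIns, pvIter, pvD, pvP, hg]
      · have hg : ¬ (3 : Int) ≤ (k : Int) := by exact_mod_cast h3
        have f2 : pvC x (k + 1) 2 = pvC x k 1 := by
          unfold pvC; rcases Nat.lt_or_ge k 1 with h | h
          · rw [if_neg (by omega), if_neg (by omega)]
          · rw [if_pos (by omega), if_pos (by omega)]; congr 1
        have f3 : pvC x (k + 1) 3 = pvC x k 2 := by
          unfold pvC; rcases Nat.lt_or_ge k 2 with h | h
          · rw [if_neg (by omega), if_neg (by omega)]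
          · rw [if_pos (by omega), if_pos (by omega)]; congr 1
        have f4 : pvC x (k + 1) 4 = pvC x k 3 := by
          unfold pvC; rcases Nat.lt_or_ge k 3 with h | h
          · rw [if_neg (by omega), if_neg (by omega)]
          · rw [if_pos (by omega), if_pos (by omega)]; congr 1
        simp [f1, f2, f3, f4, hg, h3, pvIter, pvD, pvP]

theorem pvB_prices (x : Int) (k : Nat) :
    (PySem.List.pyRange 0 (k : Int) 1).foldl
      (fun (st : Int × List Int) (_ : Int) =>
        let s := pvSecretB st.1
        (s, st.2 ++ [PySem.Int.mod s 10]))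
      (x, [PySem.Int.mod x 10])
    = (pvIter x k, (List.range (k + 1)).map (pvP x)) := by
  induction k with
  | zero => simp [pvIter, pvP]
  | succ k ih =>
      rw [show ((k + 1 : Nat) : Int) = (k : Int) + 1 by push_cast; ring,
        PySem.List.pyRange_one_succ_right (by positivity), List.foldl_append, ih]
      simp [List.range_succ, pvIter, pvP, pvSecretB, pvSecretA, pvMixA, pvMixB, pvPruneA, pvPruneB]

theorem pvStream_eq_map (x : Int) (k : Nat) :
    pvStream x k = (List.range (k - 3)).map
      (fun i => ((pvD x i, pvD x (i + 1), pvD x (i + 2), pvD x (i + 3)), pvP x (i + 4))) := by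
  induction k with
  | zero => simp [pvStream]
  | succ k ih =>
      rw [pvStream, ih]
      by_cases h3 : 3 ≤ k
      · rw [if_pos h3, show k + 1 - 3 = (k - 3) + 1 by omega, List.range_succ, List.map_append]
        have h1 : k - 3 + 1 = k - 2 := by omega
        have h2 : k - 3 + 2 = k - 1 := by omega
        have h3' : k - 3 + 3 = k := by omega
        have h4 : k - 3 + 4 = k + 1 := by omega
        simp [h1, h2, h3', h4]
      · rw [if_neg h3, show k + 1 - 3 = 0 by omega, show k - 3 = 0 by omega]
        simp

theorem pvB_pairs (x : Int) (k : Nat) :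
    (List.zip
      (List.zip ((List.zip ((List.range (k+1)).map (pvP x)) (((List.range (k+1)).map (pvP x)).drop 1)).map (fun ab => ab.2 - ab.1))
        (List.zip (((List.zip ((List.range (k+1)).map (pvP x)) (((List.range (k+1)).map (pvP x)).drop 1)).map (fun ab => ab.2 - ab.1)).drop 1)
          (List.zip (((List.zip ((List.range (k+1)).map (pvP x)) (((List.range (k+1)).map (pvP x)).drop 1)).map (fun ab => ab.2 - ab.1)).drop 2)
            (((List.zip ((List.range (k+1)).map (pvP x)) (((List.range (k+1)).map (pvP x)).drop 1)).map (fun ab => ab.2 - ab.1)).drop 3))))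
      (((List.range (k+1)).map (pvP x)).drop 4))
    = pvStream x k := by
  rw [pvStream_eq_map]
  have hchg : (List.zip ((List.range (k+1)).map (pvP x)) (((List.range (k+1)).map (pvP x)).drop 1)).map
      (fun ab => ab.2 - ab.1) = (List.range k).map (pvD x) := by
    apply List.ext_getElem
    · simp
    · intro i h1 h2
      simp [List.getElem_zip, pvD]
  rw [hchg]
  apply List.ext_getElem
  · simp
    omega
  · intro i h1 h2
    simp [List.getElem_zip, List.getElem_drop, Nat.add_comm]

-- ===== VERDICT (by name: the statement is the Claim_ definition above) =====
theorem payoff_spec : Claim_equal_payoff := by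
  intro x n _
  unfold Spec_payoff
  simp only [payoff, payoff_alt]
  by_cases h : n ≤ 0
  · rw [PySem.List.pyRange_one_eq_nil h]
    simp
  · have hk : n = ((n.toNat : Nat) : Int) := by omega
    rw [hk, pvA_loop, pvB_prices]
    simp only []
    rw [pvB_pairs]
    rfl
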